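-- pv_equiv track=rewrite | github.com/sahithivadla/cp- | 02-nearestkaprekarnumber-Python/nearestkaprekarnumber.py | iskaprekar
-- ===== SOURCE A (Python) =====
-- def iskaprekar(num):
--     ans =num**2
--     s= str(ans)
--     flag = False
--     res= ""
--     for i in range(0,len(s)):
--         res= res+s[i]
--         if(i == len(s)-2):
--             res1 = int(s[i+1])
--         elif(i == len(s)-1):
--             res1 = 0
--         else:
--             res1 = int(s[i+1:])
--         if(int(res) + res1 == num):
--             return True
--     return False
-- ===== SOURCE B (Python) =====
-- def iskaprekar(num):
--     sq = num ** 2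
--     if sq == num:
--         return True
--     L = len(str(sq))
--     for d in range(1, L):
--         m = 10 ** d - 1
--         if (sq - num) % m == 0:
--             left = (sq - num) // m
--             right = num - left
--             if 0 <= right < 10 ** d:
--                 return True
--     return False
-- ===== Notes on version B (the rewrite author's own statement) =====
-- stated objective: alternative
-- what changed: B replaces A's string building (prefix accumulation, slicing, and int() re-parsing at every split) by pure integer arithmetic: it tests each right-part width d with the identity sq - num = left*(10^d - 1), a divisibility check plus a range check on right = num - left.
import Mathlib
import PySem

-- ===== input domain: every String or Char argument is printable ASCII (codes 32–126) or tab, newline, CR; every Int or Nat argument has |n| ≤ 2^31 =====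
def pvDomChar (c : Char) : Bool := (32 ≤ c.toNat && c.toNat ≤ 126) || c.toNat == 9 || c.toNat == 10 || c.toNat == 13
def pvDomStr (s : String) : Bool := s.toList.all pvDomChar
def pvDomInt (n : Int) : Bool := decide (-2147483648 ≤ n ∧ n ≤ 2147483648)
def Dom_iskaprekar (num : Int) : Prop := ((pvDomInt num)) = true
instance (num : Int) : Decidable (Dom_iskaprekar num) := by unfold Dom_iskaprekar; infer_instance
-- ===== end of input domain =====

-- B replaces A's string splitting and int() re-parsing by a divisibility test on sq - num; alternative decomposition, same cost.

-- ===== PORT A =====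
-- int(cs) ported by hand: exact for the strings A applies it to, which are always
-- nonempty pure-digit slices of str(num**2) (no sign/space/underscore, so int() = this fold).
def pyIntDigits (cs : List Char) : Int :=
  cs.foldl (fun a c => a * 10 + ((c.toNat : Int) - 48)) 0

-- the 'for i in range(0, len(s))' loop with early return; res accumulated exactly as in A
def iskaprekarGo (num : Int) (s : List Char) (res : List Char) (i : Nat) : Bool :=
  if h : i < s.length then
    let res' := res ++ [s[i]]
    let res1 : Int :=
      if (i : Int) = (s.length : Int) - 2 then
        pyIntDigits [s.getD (i+1) ' ']            -- int(s[i+1]); i+1 < len(s) in this branch, so getD is exact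
      else if (i : Int) = (s.length : Int) - 1 then 0
      else pyIntDigits (s.drop (i+1))             -- int(s[i+1:]); slice with in-range nonneg start = drop, exact
    if pyIntDigits res' + res1 = num then true
    else iskaprekarGo num s res' (i+1)
  else false
termination_by s.length - i

def iskaprekar (num : Int) : Bool :=
  let ans := num ^ 2
  let s := (PySem.Int.toStr ans).toList          -- s = str(ans); flag in A is dead code, omitted
  iskaprekarGo num s [] 0

-- ===== PORT B =====
-- the 'for d in range(1, L)' loop with early return
def iskaprekarAltGo (num sq : Int) (L : Nat) (d : Nat) : Bool :=
  if d < L then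
    let m : Int := 10 ^ d - 1
    if PySem.Int.mod (sq - num) m = 0 then
      let left := PySem.Int.floordiv (sq - num) m
      let right := num - left
      if 0 ≤ right ∧ right < 10 ^ d then true
      else iskaprekarAltGo num sq L (d+1)
    else iskaprekarAltGo num sq L (d+1)
  else false
termination_by L - d

def iskaprekar_alt (num : Int) : Bool :=
  let sq := num ^ 2
  if sq = num then true
  else
    let L := (PySem.Int.toStr sq).toList.length  -- len(str(sq))
    iskaprekarAltGo num sq L 1

-- ===== PRECONDITION & SPEC =====
def Spec_iskaprekar (num : Int) (out : Bool) : Prop := out = iskaprekar_alt num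
instance (num : Int) (out : Bool) : Decidable (Spec_iskaprekar num out) := by unfold Spec_iskaprekar; infer_instance

-- ===== CLAIM (what is proved, stated in full; the proofs are below) =====
def Claim_equal_iskaprekar : Prop := ∀ (num : Int), Dom_iskaprekar num → Spec_iskaprekar num (iskaprekar num)

-- ===== LEMMAS AND PROOFS =====

-- decimal representation, big-endian, as produced by Nat.toDigits 10
def repC (n : Nat) : List Char :=
  if n < 10 then [Nat.digitChar n]
  else repC (n / 10) ++ [Nat.digitChar (n % 10)]
termination_by n
decreasing_by exact Nat.div_lt_self (by omega) (by norm_num)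

theorem toDigitsCore_eq (fuel : Nat) : ∀ (n : Nat) (acc : List Char), 0 < fuel → n < 10 ^ fuel →
    Nat.toDigitsCore 10 fuel n acc = repC n ++ acc := by
  induction fuel with
  | zero => intro n acc h; omega
  | succ f ih =>
    intro n acc _ hn
    rw [Nat.toDigitsCore]
    by_cases h10 : n < 10
    · have : n / 10 = 0 := Nat.div_eq_of_lt h10
      rw [repC]
      simp [this, h10, Nat.mod_eq_of_lt h10]
    · have hq : n / 10 ≠ 0 := by
        intro h; have := Nat.div_eq_of_lt (by omega : n < 10); omega
      have hfpos : 0 < f := by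
        by_contra h
        have : f = 0 := by omega
        subst this; simp at hn; omega
      have hqlt : n / 10 < 10 ^ f := by
        have : n < 10 * 10 ^ f := by
          have : (10:Nat) ^ (f+1) = 10 * 10 ^ f := by ring
          omega
        omega
      simp only [hq]
      rw [ih (n / 10) _ hfpos hqlt]
      conv_rhs => rw [repC]
      simp [h10]

theorem toChars_nonneg (n : Int) (h : 0 ≤ n) :
    (PySem.Int.toStr n).toList = repC n.toNat := by
  rw [PySem.Int.toList_toStr]
  simp only [PySem.Int.toChars, if_neg (by omega : ¬ n < 0)]
  rw [Nat.toDigits, toDigitsCore_eq (n.toNat + 1) n.toNat [] (by omega)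
      (Nat.lt_of_lt_of_le (Nat.lt_succ_self _) (Nat.le_of_lt (Nat.lt_pow_self (by norm_num))))]
  simp

theorem foldl_shift (cs : List Char) : ∀ (a : Int),
    cs.foldl (fun a c => a * 10 + ((c.toNat : Int) - 48)) a
      = a * 10 ^ cs.length + cs.foldl (fun a c => a * 10 + ((c.toNat : Int) - 48)) 0 := by
  induction cs with
  | nil => intro a; simp
  | cons c cs ih =>
    intro a
    simp only [List.foldl_cons, List.length_cons]
    rw [ih (a * 10 + ((c.toNat : Int) - 48)), ih (0 * 10 + ((c.toNat : Int) - 48))]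
    ring

theorem pyIntDigits_append (xs ys : List Char) :
    pyIntDigits (xs ++ ys) = pyIntDigits xs * 10 ^ ys.length + pyIntDigits ys := by
  unfold pyIntDigits
  rw [List.foldl_append, foldl_shift]

theorem digitChar_val (m : Nat) (h : m < 10) : ((Nat.digitChar m).toNat : Int) - 48 = m := by
  interval_cases m <;> rfl

theorem digitChar_code (m : Nat) (h : m < 10) :
    48 ≤ (Nat.digitChar m).toNat ∧ (Nat.digitChar m).toNat < 58 := by
  interval_cases m <;> exact ⟨by decide, by decide⟩

theorem repC_val (n : Nat) : pyIntDigits (repC n) = n := by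
  induction n using Nat.strong_induction_on with
  | _ n ih =>
    rw [repC]
    by_cases h : n < 10
    · simp only [if_pos h, pyIntDigits, List.foldl_cons, List.foldl_nil]
      have := digitChar_val n h
      omega
    · rw [if_neg h, pyIntDigits_append, ih (n / 10) (Nat.div_lt_self (by omega) (by norm_num))]
      simp only [List.length_cons, List.length_nil]
      have h1 := digitChar_val (n % 10) (Nat.mod_lt _ (by norm_num))
      have h2 : pyIntDigits [Nat.digitChar (n % 10)] = ((n % 10 : Nat) : Int) := by
        simp only [pyIntDigits, List.foldl_cons, List.foldl_nil]
        omega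
      rw [h2]
      have : 10 * (n / 10) + n % 10 = n := Nat.div_add_mod n 10
      push_cast
      omega

theorem repC_ne_nil (n : Nat) : repC n ≠ [] := by
  rw [repC]
  by_cases h : n < 10 <;> simp [h]

theorem repC_chars (n : Nat) : ∀ c ∈ repC n, 48 ≤ c.toNat ∧ c.toNat < 58 := by
  induction n using Nat.strong_induction_on with
  | _ n ih =>
    rw [repC]
    by_cases h : n < 10
    · simp only [if_pos h, List.mem_singleton]
      rintro c rfl
      exact digitChar_code n h
    · rw [if_neg h]
      intro c hc
      rcases List.mem_append.mp hc with hc | hc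
      · exact ih (n / 10) (Nat.div_lt_self (by omega) (by norm_num)) c hc
      · rcases List.mem_singleton.mp hc with rfl
        exact digitChar_code (n % 10) (Nat.mod_lt _ (by norm_num))

theorem digits_bounds (cs : List Char) (h : ∀ c ∈ cs, 48 ≤ c.toNat ∧ c.toNat < 58) :
    0 ≤ pyIntDigits cs ∧ pyIntDigits cs < 10 ^ cs.length := by
  induction cs with
  | nil => simp [pyIntDigits]
  | cons c cs ih =>
    have hc := h c (List.mem_cons_self ..)
    have hrest : ∀ x ∈ cs, 48 ≤ x.toNat ∧ x.toNat < 58 := fun x hx => h x (List.mem_cons_of_mem _ hx)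
    obtain ⟨ih1, ih2⟩ := ih hrest
    have hv : pyIntDigits (c :: cs) = ((c.toNat : Int) - 48) * 10 ^ cs.length + pyIntDigits cs := by
      have : c :: cs = [c] ++ cs := rfl
      rw [this, pyIntDigits_append]
      have : pyIntDigits [c] = (c.toNat : Int) - 48 := by
        simp [pyIntDigits]
      rw [this]
    rw [hv]
    have hvlo : (0:Int) ≤ (c.toNat : Int) - 48 := by omega
    have hvhi : (c.toNat : Int) - 48 ≤ 9 := by omega
    have hp : (0:Int) < 10 ^ cs.length := by positivity
    constructor
    · nlinarith
    · have : ((c.toNat : Int) - 48) * 10 ^ cs.length ≤ 9 * 10 ^ cs.length := by nlinarith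
      simp only [List.length_cons]
      have h10 : (10:Int) ^ (cs.length + 1) = 10 * 10 ^ cs.length := by ring
      nlinarith

-- uniqueness of Euclidean div/mod for positive divisor
theorem ediv_emod_of_decomp (a b q r : Int) (hb : 0 < b) (heq : a = q * b + r)
    (hr0 : 0 ≤ r) (hrb : r < b) : a / b = q ∧ a % b = r := by
  exact (Int.ediv_emod_unique hb).mpr ⟨by linarith, hr0, hrb⟩

-- the split at prefix length k of repC n reads off n / 10^d and n % 10^d, d = remaining length
theorem split_val (n : Nat) (k : Nat) (_hk : k ≤ (repC n).length) :
    pyIntDigits ((repC n).take k) = (n : Int) / 10 ^ ((repC n).length - k) ∧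
    pyIntDigits ((repC n).drop k) = (n : Int) % 10 ^ ((repC n).length - k) := by
  set s := repC n with hs
  have hsplit : s = s.take k ++ s.drop k := (List.take_append_drop k s).symm
  have hdlen : (s.drop k).length = s.length - k := by simp
  have hval : pyIntDigits (s.take k) * 10 ^ (s.length - k) + pyIntDigits (s.drop k) = (n : Int) := by
    rw [← hdlen, ← pyIntDigits_append, ← hsplit, hs, repC_val]
  have hdchars : ∀ c ∈ s.drop k, 48 ≤ c.toNat ∧ c.toNat < 58 :=
    fun c hc => repC_chars n c (List.mem_of_mem_drop hc)
  have htchars : ∀ c ∈ s.take k, 48 ≤ c.toNat ∧ c.toNat < 58 :=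
    fun c hc => repC_chars n c (List.mem_of_mem_take hc)
  obtain ⟨hd0, hdlt⟩ := digits_bounds _ hdchars
  rw [hdlen] at hdlt
  have := ediv_emod_of_decomp (n : Int) (10 ^ (s.length - k)) (pyIntDigits (s.take k))
    (pyIntDigits (s.drop k)) (by positivity) (by linarith) hd0 hdlt
  exact ⟨this.1.symm, this.2.symm⟩

-- uniform arithmetic form of A's test at index j (s = repC n, j < |s|)
def condArith (num n : Int) (d : Nat) : Prop := n / 10 ^ d + n % 10 ^ d = num

-- A's loop returns true iff some split from i on satisfies the test

-- the branchy res1 of A collapses to the value of the dropped suffix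
theorem testA_iff (num : Int) (n : Nat) (i : Nat) (hi : i < (repC n).length) :
    (pyIntDigits ((repC n).take (i+1)) +
       (if (i : Int) = ((repC n).length : Int) - 2 then pyIntDigits [(repC n).getD (i+1) ' ']
        else if (i : Int) = ((repC n).length : Int) - 1 then 0
        else pyIntDigits ((repC n).drop (i+1))) = num)
    ↔ condArith num (n : Int) ((repC n).length - (i+1)) := by
  have hres1 : (if (i : Int) = (((repC n).length : Int)) - 2 then pyIntDigits [(repC n).getD (i+1) ' ']
      else if (i : Int) = (((repC n).length : Int)) - 1 then 0
      else pyIntDigits ((repC n).drop (i+1))) = pyIntDigits ((repC n).drop (i+1)) := by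
    by_cases h2 : (i : Int) = (((repC n).length : Int)) - 2
    · have hi1 : i + 1 < (repC n).length := by omega
      have hdrop : (repC n).drop (i+1) = [(repC n)[i+1]] := by
        rw [List.drop_eq_getElem_cons hi1, List.drop_eq_nil_of_le (by omega)]
      rw [if_pos h2, hdrop, List.getD_eq_getElem (repC n) ' ' hi1]
    · by_cases h1 : (i : Int) = (((repC n).length : Int)) - 1
      · have hnil : (repC n).drop (i+1) = [] := List.drop_eq_nil_of_le (by omega)
        simp [h1, hnil, pyIntDigits]
      · simp [h2, h1]
  rw [hres1]
  obtain ⟨ht, hd⟩ := split_val n (i+1) (by omega)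
  rw [ht, hd]
  exact Iff.rfl

theorem goA_iff (num : Int) (n : Nat) : ∀ (k i : Nat), (repC n).length - i = k →
    (iskaprekarGo num (repC n) ((repC n).take i) i = true ↔
      ∃ j, i ≤ j ∧ j < (repC n).length ∧
        condArith num (n : Int) ((repC n).length - (j+1))) := by
  intro k
  induction k with
  | zero =>
    intro i hk
    rw [iskaprekarGo]
    have hge : ¬ i < (repC n).length := by omega
    rw [dif_neg hge]
    constructor
    · intro h; cases h
    · rintro ⟨j, h1, h2, _⟩; omega
  | succ k ih =>
    intro i hk
    have hlt : i < (repC n).length := by omega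
    rw [iskaprekarGo]
    simp only [dif_pos hlt]
    have htake : (repC n).take i ++ [(repC n)[i]] = (repC n).take (i+1) := by
      rw [List.take_add_one, List.getElem?_eq_getElem hlt]
      rfl
    rw [htake]
    by_cases htest : pyIntDigits ((repC n).take (i+1)) +
       (if (i : Int) = ((repC n).length : Int) - 2 then pyIntDigits [(repC n).getD (i+1) ' ']
        else if (i : Int) = ((repC n).length : Int) - 1 then 0
        else pyIntDigits ((repC n).drop (i+1))) = num
    · simp only [if_pos htest, true_iff]
      exact ⟨i, le_refl _, hlt, (testA_iff num n i hlt).mp htest⟩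
    · simp only [if_neg htest]
      rw [ih (i+1) (by omega)]
      constructor
      · rintro ⟨j, h1, h2, h3⟩
        exact ⟨j, by omega, h2, h3⟩
      · rintro ⟨j, h1, h2, h3⟩
        by_cases heq : j = i
        · subst heq
          exact absurd ((testA_iff num n j hlt).mpr h3) htest
        · exact ⟨j, by omega, h2, h3⟩



theorem goB_iff (num sq : Int) (L : Nat) : ∀ (k d0 : Nat), L - d0 = k →
    (iskaprekarAltGo num sq L d0 = true ↔
      ∃ d, d0 ≤ d ∧ d < L ∧
        (PySem.Int.mod (sq - num) (10 ^ d - 1) = 0 ∧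
         0 ≤ num - PySem.Int.floordiv (sq - num) (10 ^ d - 1) ∧
         num - PySem.Int.floordiv (sq - num) (10 ^ d - 1) < 10 ^ d)) := by
  intro k
  induction k with
  | zero =>
    intro d0 hk
    rw [iskaprekarAltGo]
    have hge : ¬ d0 < L := by omega
    rw [if_neg hge]
    constructor
    · intro h; cases h
    · rintro ⟨d, h1, h2, _⟩; omega
  | succ k ih =>
    intro d0 hk
    have hlt : d0 < L := by omega
    rw [iskaprekarAltGo]
    simp only [if_pos hlt]
    by_cases hmod : PySem.Int.mod (sq - num) (10 ^ d0 - 1) = 0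
    · simp only [if_pos hmod]
      by_cases hrange : 0 ≤ num - PySem.Int.floordiv (sq - num) (10 ^ d0 - 1) ∧
          num - PySem.Int.floordiv (sq - num) (10 ^ d0 - 1) < 10 ^ d0
      · simp only [if_pos hrange, true_iff]
        exact ⟨d0, le_refl _, hlt, hmod, hrange.1, hrange.2⟩
      · simp only [if_neg hrange]
        rw [ih (d0+1) (by omega)]
        constructor
        · rintro ⟨d, h1, h2, h3⟩
          exact ⟨d, by omega, h2, h3⟩
        · rintro ⟨d, h1, h2, h3⟩
          by_cases heq : d = d0
          · subst heq
            exact absurd ⟨h3.2.1, h3.2.2⟩ hrange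
          · exact ⟨d, by omega, h2, h3⟩
    · simp only [if_neg hmod]
      rw [ih (d0+1) (by omega)]
      constructor
      · rintro ⟨d, h1, h2, h3⟩
        exact ⟨d, by omega, h2, h3⟩
      · rintro ⟨d, h1, h2, h3⟩
        by_cases heq : d = d0
        · subst heq
          exact absurd h3.1 hmod
        · exact ⟨d, by omega, h2, h3⟩



theorem PA_iff_PB (num n : Int) (d : Nat) (hd : 1 ≤ d) :
    condArith num n d ↔
      (PySem.Int.mod (n - num) (10 ^ d - 1) = 0 ∧
       0 ≤ num - PySem.Int.floordiv (n - num) (10 ^ d - 1) ∧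
       num - PySem.Int.floordiv (n - num) (10 ^ d - 1) < 10 ^ d) := by
  have hbpos : (0:Int) < 10 ^ d := by positivity
  have hb10 : (10:Int) ≤ 10 ^ d := by
    calc (10:Int) = 10 ^ 1 := (pow_one 10).symm
    _ ≤ 10 ^ d := pow_le_pow_right₀ (by norm_num) hd
  have hm : (0:Int) < 10 ^ d - 1 := by omega
  rw [PySem.Int.mod_eq_emod_of_pos hm, PySem.Int.floordiv_eq_ediv_of_pos hm]
  unfold condArith
  constructor
  · intro h
    have hdm : 10 ^ d * (n / 10 ^ d) + n % 10 ^ d = n := Int.mul_ediv_add_emod n (10 ^ d)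
    have hqm : n - num = (n / 10 ^ d) * (10 ^ d - 1) := by linarith
    refine ⟨?_, ?_, ?_⟩
    · rw [hqm]; exact Int.mul_emod_left _ _
    · rw [hqm, Int.mul_ediv_cancel _ (by omega)]
      have := Int.emod_nonneg n (by omega : (10:Int) ^ d ≠ 0)
      omega
    · rw [hqm, Int.mul_ediv_cancel _ (by omega)]
      have := Int.emod_lt_of_pos n hbpos
      omega
  · rintro ⟨h0, h1, h2⟩
    have hdm : (10 ^ d - 1) * ((n - num) / (10 ^ d - 1)) + (n - num) % (10 ^ d - 1) = n - num :=
      Int.mul_ediv_add_emod _ _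
    rw [h0, add_zero] at hdm
    obtain ⟨he, hmo⟩ := ediv_emod_of_decomp n (10 ^ d) ((n - num) / (10 ^ d - 1))
      (num - (n - num) / (10 ^ d - 1)) hbpos (by linarith) h1 h2
    omega



-- reindexing: A tests suffix widths L-1, …, 0; B tests widths 1, …, L-1 after the sq == num check
theorem exists_reindex (num sqI : Int) (L : Nat) (hL : 1 ≤ L) :
    (∃ j, j < L ∧ condArith num sqI (L - (j+1))) ↔
      (condArith num sqI 0 ∨ ∃ d, 1 ≤ d ∧ d < L ∧ condArith num sqI d) := by
  constructor
  · rintro ⟨j, hj, hc⟩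
    by_cases h : j + 1 = L
    · left
      have : L - (j+1) = 0 := by omega
      rwa [this] at hc
    · right
      exact ⟨L - (j+1), by omega, by omega, hc⟩
  · rintro (h | ⟨d, h1, h2, hc⟩)
    · exact ⟨L - 1, by omega, by
        have : L - (L - 1 + 1) = 0 := by omega
        rwa [this]⟩
    · exact ⟨L - (d+1), by omega, by
        have : L - (L - (d+1) + 1) = d := by omega
        rwa [this]⟩

theorem iskaprekar_eq_true_iff (num : Int) :
    (iskaprekar num = true ↔
      ∃ j, j < (repC (num ^ 2).toNat).length ∧
        condArith num (((num ^ 2).toNat : Int)) ((repC (num ^ 2).toNat).length - (j+1))) := by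
  rw [show iskaprekar num = iskaprekarGo num ((PySem.Int.toStr (num ^ 2)).toList) [] 0 from rfl]
  rw [toChars_nonneg _ (sq_nonneg num)]
  have h0 : ([] : List Char) = (repC (num ^ 2).toNat).take 0 := rfl
  rw [h0, goA_iff num (num ^ 2).toNat ((repC (num ^ 2).toNat).length - 0) 0 rfl]
  constructor
  · rintro ⟨j, _, h2, h3⟩; exact ⟨j, h2, h3⟩
  · rintro ⟨j, h2, h3⟩; exact ⟨j, Nat.zero_le _, h2, h3⟩

-- ===== VERDICT (by name: the statement is the Claim_ definition above) =====
theorem iskaprekar_spec : Claim_equal_iskaprekar := by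
  unfold Claim_equal_iskaprekar
  intro num _
  unfold Spec_iskaprekar
  have hsq : (0:Int) ≤ num ^ 2 := sq_nonneg num
  have hcast : (((num ^ 2).toNat : Int)) = num ^ 2 := Int.toNat_of_nonneg hsq
  set L := (repC (num ^ 2).toNat).length with hL
  have hL1 : 1 ≤ L := by
    rw [hL]
    exact List.length_pos_of_ne_nil (repC_ne_nil _)
  have hc0 : condArith num (((num ^ 2).toNat : Int)) 0 ↔ num ^ 2 = num := by
    unfold condArith
    rw [pow_zero, Int.ediv_one, Int.emod_one, add_zero, hcast]
  have hA := iskaprekar_eq_true_iff num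
  rw [exists_reindex num _ L hL1] at hA
  have hB : iskaprekar_alt num = true ↔
      (num ^ 2 = num ∨ ∃ d, 1 ≤ d ∧ d < L ∧ condArith num (((num ^ 2).toNat : Int)) d) := by
    rw [show iskaprekar_alt num = (if num ^ 2 = num then true
        else iskaprekarAltGo num (num ^ 2) ((PySem.Int.toStr (num ^ 2)).toList).length 1) from rfl]
    by_cases heq : num ^ 2 = num
    · simp [heq]
    · rw [if_neg heq]
      rw [toChars_nonneg _ hsq, ← hL]
      rw [goB_iff num (num ^ 2) L (L - 1) 1 rfl]
      constructor
      · rintro ⟨d, h1, h2, h3⟩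
        right
        refine ⟨d, h1, h2, ?_⟩
        rw [PA_iff_PB num _ d h1, hcast]
        exact h3
      · rintro (h | ⟨d, h1, h2, h3⟩)
        · exact absurd h heq
        · refine ⟨d, h1, h2, ?_⟩
          rw [PA_iff_PB num _ d h1, hcast] at h3
          exact h3
  rw [Bool.eq_iff_iff, hA, hB, hc0]
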